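-- pv_equiv track=rewrite | github.com/ywaaag/mathorcup-template | scripts/lib/workflow_kernel/audit_index.py | sections_by_heading
-- ===== SOURCE A (Python) =====
-- from typing import Any, Dict, List, Optional, Sequence, Tuple
--
-- def sections_by_heading(lines: Sequence[str]) -> Dict[str, List[str]]:
--     sections: Dict[str, List[str]] = {}
--     current: str | None = None
--     for raw_line in lines:
--         line = raw_line.rstrip()
--         if line.startswith("## "):
--             current = line.strip()
--             sections.setdefault(current, [])
--             continue
--         if current is not None:
--             sections[current].append(line)
--     return sections
-- ===== SOURCE B (Python) =====
-- def sections_by_heading(lines):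
--     # Boundary scan: walk an index over the lines; for each heading take the
--     # whole block up to the next heading at once and merge it into the dict.
--     lines = list(lines)
--     n = len(lines)
--
--     def is_heading(ln):
--         return ln.rstrip().startswith("## ")
--
--     i = 0
--     while i < n and not is_heading(lines[i]):
--         i += 1
--
--     sections = {}
--     while i < n:
--         key = lines[i].strip()
--         j = i + 1
--         while j < n and not is_heading(lines[j]):
--             j += 1
--         sections.setdefault(key, []).extend(ln.rstrip() for ln in lines[i + 1:j])
--         i = j
--     return sections
-- ===== Notes on version B (the rewrite author's own statement) =====
-- stated objective: alternative
-- what changed: A makes one stateful pass keeping a 'current heading' register and appending line by line; B first skips the prologue, then jumps from heading boundary to heading boundary, slicing out each whole block and merging it into the dict in one setdefault/extend step.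
import Mathlib
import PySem

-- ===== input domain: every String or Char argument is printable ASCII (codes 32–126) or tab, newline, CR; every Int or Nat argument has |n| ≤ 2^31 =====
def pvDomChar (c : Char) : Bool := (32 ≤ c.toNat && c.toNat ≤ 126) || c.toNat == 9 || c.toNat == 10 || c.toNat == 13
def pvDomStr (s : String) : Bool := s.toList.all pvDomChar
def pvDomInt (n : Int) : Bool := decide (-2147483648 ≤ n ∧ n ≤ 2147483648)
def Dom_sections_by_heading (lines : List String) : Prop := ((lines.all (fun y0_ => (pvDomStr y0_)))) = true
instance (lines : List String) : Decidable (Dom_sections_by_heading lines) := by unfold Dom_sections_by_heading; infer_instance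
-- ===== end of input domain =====

-- B replaces A's stateful line-by-line pass (dict + current-heading register) by a boundary
-- scan that jumps from heading to heading and merges each whole block at once (objective:
-- alternative decomposition, same cost).

-- ===== PORT A =====
-- one loop iteration of A: state is (sections, current)
def pvStepA (st : PySem.Dict String (List String) × Option String) (raw_line : String) :
    PySem.Dict String (List String) × Option String :=
  let line := PySem.Str.rstrip raw_line
  if PySem.Str.startswith line "## " then
    let current := PySem.Str.strip line
    (st.1.setdefault current [], some current)
  else
    match st.2 with
    | some cur => (st.1.modify cur [] (fun v => v ++ [line]), st.2)
    | none => st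

def sections_by_heading (lines : List String) : List (String × List String) :=
  (lines.foldl pvStepA (PySem.Dict.empty, none)).1.items

-- ===== PORT B =====
def pvIsHeading (ln : String) : Bool :=
  PySem.Str.startswith (PySem.Str.rstrip ln) "## "

-- while i < n and not is_heading(lines[i]): i += 1
def pvSkip (lines : List String) (i : Nat) : Nat :=
  if h : i < lines.length then
    if pvIsHeading lines[i] then i else pvSkip lines (i + 1)
  else i
termination_by lines.length - i

-- i ≤ pvSkip lines i : cited by pvLoop's decreasing_by, so it stays with the port
theorem pvSkip_ge (lines : List String) (i : Nat) : i ≤ pvSkip lines i := by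
  unfold pvSkip
  split
  · split
    · exact le_refl i
    · exact le_trans (Nat.le_succ i) (pvSkip_ge lines (i + 1))
  · exact le_refl i
termination_by lines.length - i

-- the outer while-loop of B; one iteration per heading, merging its whole block at once
def pvLoop (lines : List String) (sections : PySem.Dict String (List String)) (i : Nat) :
    PySem.Dict String (List String) :=
  if h : i < lines.length then
    let key := PySem.Str.strip lines[i]
    let j := pvSkip lines (i + 1)
    let block := (PySem.List.slice lines (some ((i + 1 : Nat) : Int)) (some ((j : Nat) : Int))).map
      PySem.Str.rstrip
    pvLoop lines (sections.modify key [] (fun v => v ++ block)) j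
  else sections
termination_by lines.length - i
decreasing_by
  have := pvSkip_ge lines (i + 1)
  omega

def sections_by_heading_alt (lines : List String) : List (String × List String) :=
  (pvLoop lines PySem.Dict.empty (pvSkip lines 0)).items

-- ===== PRECONDITION & SPEC =====
def Spec_sections_by_heading (lines : List String) (out : List (String × List String)) : Prop := out = sections_by_heading_alt lines
instance (lines : List String) (out : List (String × List String)) : Decidable (Spec_sections_by_heading lines out) := by unfold Spec_sections_by_heading; infer_instance

-- ===== CLAIM (what is proved, stated in full; the proofs are below) =====
def Claim_equal_sections_by_heading : Prop := ∀ (lines : List String), Dom_sections_by_heading lines → Spec_sections_by_heading lines (sections_by_heading lines)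

-- ===== LEMMAS AND PROOFS =====

theorem pv_drop_rdrop (p : Char → Bool) (l : List Char) :
    List.dropWhile p (List.rdropWhile p l) = List.rdropWhile p (List.dropWhile p l) := by
  by_cases hu : List.dropWhile p l = []
  · rw [hu, List.rdropWhile_nil]
    rw [List.rdropWhile_eq_nil_iff.mpr (List.dropWhile_eq_nil_iff.mp hu), List.dropWhile_nil]
  · -- decompose l
    have hsplit : l = List.takeWhile p l ++ List.dropWhile p l := (List.takeWhile_append_dropWhile).symm
    have hrne : List.rdropWhile p (List.dropWhile p l) ≠ [] := by
      intro hcon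
      have hall := List.rdropWhile_eq_nil_iff.mp hcon
      have hhead := List.head_dropWhile_not p hu
      exact absurd (hall _ (List.head_mem hu)) (by simp [hhead])
    have hstep1 : List.rdropWhile p l
        = List.takeWhile p l ++ List.rdropWhile p (List.dropWhile p l) := by
      conv_lhs => rw [hsplit]
      unfold List.rdropWhile
      rw [List.reverse_append, List.dropWhile_append]
      have : (List.dropWhile p (List.dropWhile p l).reverse).isEmpty = false := by
        rw [List.isEmpty_eq_false_iff]
        intro hcon
        apply hrne
        unfold List.rdropWhile
        rw [hcon, List.reverse_nil]
      rw [this]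
      simp only [Bool.false_eq_true, if_false]
      simp [List.reverse_append, List.rdropWhile]
    rw [hstep1, List.dropWhile_append]
    have htw : List.dropWhile p (List.takeWhile p l) = [] :=
      List.dropWhile_eq_nil_iff.mpr (fun x hx => List.mem_takeWhile_imp hx)
    rw [htw]
    simp only [List.isEmpty_nil, if_true]
    -- dropWhile on rdropWhile(dropWhile l): head fails p
    have hpref := List.rdropWhile_prefix p (List.dropWhile p l)
    have hheads := hpref.head hrne
    rw [List.dropWhile_eq_self_iff.mpr]
    intro hl
    have : (List.rdropWhile p (List.dropWhile p l))[0] = (List.dropWhile p l).head hu := by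
      rw [← List.head_eq_getElem]
      exact hheads
    rw [this]
    simp [List.head_dropWhile_not p hu]

theorem pv_rstrip_comm_lstrip (l : List Char) :
    PySem.Chars.lstrip (PySem.Chars.rstrip l) = PySem.Chars.rstrip (PySem.Chars.lstrip l) := by
  have h := pv_drop_rdrop PySem.Chars.isspace l
  unfold PySem.Chars.lstrip PySem.Chars.rstrip
  unfold List.rdropWhile at h
  exact h

theorem pv_rstrip_idem (l : List Char) :
    PySem.Chars.rstrip (PySem.Chars.rstrip l) = PySem.Chars.rstrip l := by
  have h := List.rdropWhile_idempotent (p := PySem.Chars.isspace) (l := l)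
  unfold List.rdropWhile at h
  exact h

theorem pv_strip_rstrip (s : String) :
    PySem.Str.strip (PySem.Str.rstrip s) = PySem.Str.strip s := by
  unfold PySem.Str.strip
  refine congrArg String.ofList ?_
  rw [PySem.Str.toList_rstrip]
  unfold PySem.Chars.strip
  rw [pv_rstrip_comm_lstrip, pv_rstrip_idem]

theorem contains_insert_self (d : PySem.Dict String (List String)) (k : String) (v : List String) :
    (d.insert k v).contains k = true := by
  unfold PySem.Dict.insert PySem.Dict.contains
  by_cases hc : d.items.any (fun p => p.1 == k) = true
  · simp only [PySem.Dict.contains, hc, if_true, List.any_map]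
    rcases List.any_eq_true.mp hc with ⟨p, hp, hpk⟩
    exact List.any_eq_true.mpr ⟨p, hp, by simp [Function.comp, hpk]⟩
  · simp only [PySem.Dict.contains, hc, if_false, Bool.not_eq_true]
    simp [List.any_append]

theorem pv_ins_ins (d : PySem.Dict String (List String)) (k : String) (v w : List String) :
    (d.insert k v).insert k w = d.insert k w := by
  have h1 : (d.insert k v).contains k = true := contains_insert_self d k v
  unfold PySem.Dict.insert at *
  by_cases hc : d.contains k = true
  · simp only [hc, if_true] at *
    simp only [h1, if_true]
    congr 1
    simp only [List.map_map]
    apply List.map_congr_left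
    intro p _
    by_cases hp : p.1 = k <;> simp [Function.comp, hp]
  · have hcf : d.contains k = false := by simpa using hc
    simp only [hcf, Bool.false_eq_true, if_false] at h1 ⊢
    simp only [h1, if_true]
    congr 1
    have hno : ∀ p ∈ d.items, (p.1 == k) = false := by
      have := hcf
      unfold PySem.Dict.contains at this
      exact fun p hp => by simpa using List.any_eq_false.mp this p hp
    simp only [List.map_append]
    have hmap : d.items.map (fun p => if (p.1 == k) = true then (k, w) else p) = d.items := by
      have := List.map_congr_left (l := d.items)
        (f := fun p => if (p.1 == k) = true then (k, w) else p) (g := id)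
        (fun p hp => by simp [hno p hp])
      simpa using this
    rw [hmap]
    simp

theorem pv_modify_modify (d : PySem.Dict String (List String)) (k : String) (a b : List String) :
    (d.modify k [] (fun v => v ++ a)).modify k [] (fun v => v ++ b)
      = d.modify k [] (fun v => v ++ (a ++ b)) := by
  unfold PySem.Dict.modify
  rw [PySem.Dict.getD_insert_self, pv_ins_ins]
  simp [List.append_assoc]

theorem pv_not_mem_keys (d : PySem.Dict String (List String)) (k : String)
    (hc : d.contains k = false) : k ∉ d.keys := by
  unfold PySem.Dict.contains at hc
  unfold PySem.Dict.keys
  intro hmem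
  rcases List.mem_map.mp hmem with ⟨p, hp, hpk⟩
  have := List.any_eq_false.mp hc p hp
  simp [hpk] at this

theorem pv_get?_none (d : PySem.Dict String (List String)) (k : String)
    (hc : d.contains k = false) : d.get? k = none := by
  unfold PySem.Dict.contains at hc
  unfold PySem.Dict.get?
  rw [List.find?_eq_none.mpr (fun p hp => by simpa using List.any_eq_false.mp hc p hp)]
  rfl

theorem pv_setdefault_modify (d : PySem.Dict String (List String)) (k : String) (b : List String) :
    (d.setdefault k []).modify k [] (fun v => v ++ b) = d.modify k [] (fun v => v ++ b) := by
  by_cases hc : d.contains k = true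
  · rw [PySem.Dict.setdefault_of_contains d [] hc]
  · have hcf : d.contains k = false := by simpa using hc
    rw [PySem.Dict.setdefault_of_not_contains d [] hcf]
    unfold PySem.Dict.modify
    rw [PySem.Dict.getD_insert_self, pv_ins_ins]
    unfold PySem.Dict.getD
    rw [pv_get?_none d k hcf]
    rfl

theorem pv_contains_modify_self (d : PySem.Dict String (List String)) (k : String)
    (f : List String → List String) : (d.modify k [] f).contains k = true := by
  simp [PySem.Dict.contains_modify]

theorem pv_contains_setdefault_self (d : PySem.Dict String (List String)) (k : String) :
    (d.setdefault k []).contains k = true := by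
  simp [PySem.Dict.contains_setdefault]

theorem pv_keys_insert_of_contains (d : PySem.Dict String (List String)) (k : String)
    (v : List String) (hc : d.contains k = true) : (d.insert k v).keys = d.keys := by
  unfold PySem.Dict.insert
  rw [if_pos hc]
  unfold PySem.Dict.keys
  simp only [List.map_map]
  apply List.map_congr_left
  intro p _
  by_cases hp : p.1 = k <;> simp [Function.comp, hp]

theorem pv_nodup_insert (d : PySem.Dict String (List String)) (k : String) (v : List String)
    (h : d.keys.Nodup) : ((d.insert k v).keys).Nodup := by
  by_cases hc : d.contains k = true
  · rw [pv_keys_insert_of_contains d k v hc]; exact h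
  · have hcf : d.contains k = false := by simpa using hc
    unfold PySem.Dict.insert
    rw [hcf]
    simp only [Bool.false_eq_true, if_false]
    have hk : k ∉ d.keys := pv_not_mem_keys d k hcf
    unfold PySem.Dict.keys at *
    simp only [List.map_append, List.map_cons, List.map_nil]
    simp only [List.nodup_append, h, List.nodup_singleton, true_and]
    intro a hmem b hb
    simp only [List.mem_singleton] at hb
    subst hb
    intro hab
    rw [hab] at hmem
    exact hk hmem

theorem pv_nodup_setdefault (d : PySem.Dict String (List String)) (k : String)
    (h : d.keys.Nodup) : ((d.setdefault k []).keys).Nodup := by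
  by_cases hc : d.contains k = true
  · rw [PySem.Dict.setdefault_of_contains d [] hc]; exact h
  · have hcf : d.contains k = false := by simpa using hc
    rw [PySem.Dict.setdefault_of_not_contains d [] hcf]
    exact pv_nodup_insert d k [] h

theorem pv_find?_nodup (k : String) : ∀ (l : List (String × List String)),
    (l.map Prod.fst).Nodup → ∀ p ∈ l, p.1 = k →
    l.find? (fun q => q.1 == k) = some p := by
  intro l
  induction l with
  | nil => intro _ p hp _; simp at hp
  | cons a t ih =>
    intro hnd p hp hpk
    rcases List.mem_cons.mp hp with rfl | hpt
    · simp [List.find?_cons, hpk]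
    · have hak : (a.1 == k) = false := by
        simp only [List.map_cons, List.nodup_cons] at hnd
        have : p.1 ∈ t.map Prod.fst := List.mem_map.mpr ⟨p, hpt, rfl⟩
        rw [hpk] at this
        by_contra hcon
        simp only [Bool.not_eq_false, beq_iff_eq] at hcon
        rw [hcon] at hnd
        exact hnd.1 this
      rw [List.find?_cons, hak]
      exact ih (by simp only [List.map_cons, List.nodup_cons] at hnd; exact hnd.2) p hpt hpk

theorem pv_noop_modify (d : PySem.Dict String (List String)) (k : String)
    (hnd : d.keys.Nodup) (hc : d.contains k = true) :
    d.modify k [] (fun v => v ++ []) = d := by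
  unfold PySem.Dict.modify PySem.Dict.insert
  rw [if_pos hc]
  cases d with
  | mk items =>
    congr 1
    have hmap : ∀ p ∈ items, (if (p.1 == k) = true then (k, (PySem.Dict.mk items).getD k [] ++ []) else p) = p := by
      intro p hp
      by_cases hpk : p.1 = k
      · have hfind := pv_find?_nodup k items hnd p hp hpk
        unfold PySem.Dict.getD PySem.Dict.get?
        simp only [PySem.Dict.items] at hfind ⊢
        rw [hfind]
        cases p with | mk x y => simp_all
      · simp [hpk]
    have := List.map_congr_left (l := items)
      (f := fun p => if (p.1 == k) = true then (k, (PySem.Dict.mk items).getD k [] ++ []) else p)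
      (g := id) (fun p hp => by simpa using hmap p hp)
    simpa using this

theorem pv_slice_nil (lines : List String) (i : Nat) :
    PySem.List.slice lines (some ((i : Nat) : Int)) (some ((i : Nat) : Int)) = [] := by
  simp [PySem.List.slice_natCast]

theorem pv_slice_cons (lines : List String) (i j : Nat) (hi : i < lines.length) (hij : i < j) :
    PySem.List.slice lines (some ((i : Nat) : Int)) (some ((j : Nat) : Int))
      = lines[i] :: PySem.List.slice lines (some ((i + 1 : Nat) : Int)) (some ((j : Nat) : Int)) := by
  rw [PySem.List.slice_natCast, PySem.List.slice_natCast, List.drop_eq_getElem_cons hi]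
  have hji : j - i = (j - (i + 1)) + 1 := by omega
  rw [hji, List.take_succ_cons]

theorem pv_main_some (lines : List String) (i : Nat) (d : PySem.Dict String (List String))
    (k : String) (hnd : d.keys.Nodup) (hc : d.contains k = true) :
    (List.foldl pvStepA (d, some k) (lines.drop i)).1
      = pvLoop lines
          (d.modify k [] (fun v => v ++
            (PySem.List.slice lines (some ((i : Nat) : Int)) (some ((pvSkip lines i : Nat) : Int))).map
              PySem.Str.rstrip))
          (pvSkip lines i) := by
  by_cases h : i < lines.length
  · rw [List.drop_eq_getElem_cons h, List.foldl_cons]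
    by_cases hh : pvIsHeading lines[i] = true
    · -- heading line
      have hhs : PySem.Str.startswith (PySem.Str.rstrip lines[i]) "## " = true := hh
      have hstep : pvStepA (d, some k) lines[i]
          = (d.setdefault (PySem.Str.strip lines[i]) [], some (PySem.Str.strip lines[i])) := by
        simp only [pvStepA, hhs, if_true, pv_strip_rstrip]
      have hskip : pvSkip lines i = i := by
        unfold pvSkip; rw [dif_pos h, if_pos hh]
      rw [hstep, hskip, pv_slice_nil]
      simp only [List.map_nil]
      rw [pv_noop_modify d k hnd hc]
      conv_rhs => unfold pvLoop
      rw [dif_pos h]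
      have ih := pv_main_some lines (i + 1) (d.setdefault (PySem.Str.strip lines[i]) [])
        (PySem.Str.strip lines[i]) (pv_nodup_setdefault d _ hnd)
        (pv_contains_setdefault_self d _)
      rw [ih, pv_setdefault_modify]
    · -- body line
      have hhs : PySem.Str.startswith (PySem.Str.rstrip lines[i]) "## " = false := by
        simpa [pvIsHeading] using hh
      have hstep : pvStepA (d, some k) lines[i]
          = (d.modify k [] (fun v => v ++ [PySem.Str.rstrip lines[i]]), some k) := by
        simp only [pvStepA, hhs, Bool.false_eq_true, if_false]
      have hskip : pvSkip lines i = pvSkip lines (i + 1) := by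
        conv_lhs => unfold pvSkip
        rw [dif_pos h, if_neg (by simpa using hh)]
      have hlt : i < pvSkip lines (i + 1) := lt_of_lt_of_le (Nat.lt_succ_self i) (pvSkip_ge lines (i + 1))
      have ih := pv_main_some lines (i + 1) (d.modify k [] (fun v => v ++ [PySem.Str.rstrip lines[i]])) k
        (by rw [PySem.Dict.keys_modify]; exact pv_nodup_insert d k _ hnd)
        (pv_contains_modify_self d k _)
      rw [hstep, ih, pv_modify_modify, hskip, pv_slice_cons lines i (pvSkip lines (i + 1)) h hlt]
      simp only [List.map_cons]
      rfl
  · have hge : lines.length ≤ i := Nat.le_of_not_lt h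
    rw [List.drop_eq_nil_of_le hge, List.foldl_nil]
    have hskip : pvSkip lines i = i := by unfold pvSkip; rw [dif_neg h]
    rw [hskip, pv_slice_nil]
    simp only [List.map_nil]
    rw [pv_noop_modify d k hnd hc]
    conv_rhs => unfold pvLoop
    rw [dif_neg h]
termination_by lines.length - i

theorem pv_main_none (lines : List String) (i : Nat) (d : PySem.Dict String (List String))
    (hnd : d.keys.Nodup) :
    (List.foldl pvStepA (d, none) (lines.drop i)).1 = pvLoop lines d (pvSkip lines i) := by
  by_cases h : i < lines.length
  · rw [List.drop_eq_getElem_cons h, List.foldl_cons]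
    by_cases hh : pvIsHeading lines[i] = true
    · have hhs : PySem.Str.startswith (PySem.Str.rstrip lines[i]) "## " = true := hh
      have hstep : pvStepA (d, none) lines[i]
          = (d.setdefault (PySem.Str.strip lines[i]) [], some (PySem.Str.strip lines[i])) := by
        simp only [pvStepA, hhs, if_true, pv_strip_rstrip]
      have hskip : pvSkip lines i = i := by
        unfold pvSkip; rw [dif_pos h, if_pos hh]
      rw [hstep, hskip]
      conv_rhs => unfold pvLoop
      rw [dif_pos h]
      have ih := pv_main_some lines (i + 1) (d.setdefault (PySem.Str.strip lines[i]) [])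
        (PySem.Str.strip lines[i]) (pv_nodup_setdefault d _ hnd)
        (pv_contains_setdefault_self d _)
      rw [ih, pv_setdefault_modify]
    · have hhs : PySem.Str.startswith (PySem.Str.rstrip lines[i]) "## " = false := by
        simpa [pvIsHeading] using hh
      have hstep : pvStepA (d, none) lines[i] = (d, none) := by
        simp only [pvStepA, hhs, Bool.false_eq_true, if_false]
      have hskip : pvSkip lines i = pvSkip lines (i + 1) := by
        conv_lhs => unfold pvSkip
        rw [dif_pos h, if_neg (by simpa using hh)]
      rw [hstep, hskip]
      exact pv_main_none lines (i + 1) d hnd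
  · have hge : lines.length ≤ i := Nat.le_of_not_lt h
    rw [List.drop_eq_nil_of_le hge, List.foldl_nil]
    have hskip : pvSkip lines i = i := by unfold pvSkip; rw [dif_neg h]
    rw [hskip]
    conv_rhs => unfold pvLoop
    rw [dif_neg h]
termination_by lines.length - i

-- ===== VERDICT (by name: the statement is the Claim_ definition above) =====
theorem sections_by_heading_spec : Claim_equal_sections_by_heading := by
  intro lines _
  unfold Spec_sections_by_heading sections_by_heading sections_by_heading_alt
  have h := pv_main_none lines 0 PySem.Dict.empty (by simp [PySem.Dict.keys, PySem.Dict.empty])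
  simpa using congrArg PySem.Dict.items h
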